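-- pv_equiv track=rewrite | github.com/katiarojas87/final-project | suumo_scrape.py | build_context_maps
-- ===== SOURCE A (Python) =====
-- from typing import Dict, List, Optional, Set, Tuple
--
-- def build_context_maps(
--     candidates: List[Tuple[str, str]],
--     regex_candidates: List[Tuple[str, str]],
-- ) -> Tuple[Dict[str, str], Dict[str, str]]:
--     dom_context_by_url: Dict[str, str] = {}
--     regex_context_by_url: Dict[str, str] = {}
--     for u, ctx in candidates:
--         if u not in dom_context_by_url or len(ctx) > len(dom_context_by_url[u]):
--             dom_context_by_url[u] = ctx
--     for u, ctx in regex_candidates: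
--         if u not in regex_context_by_url or len(ctx) > len(regex_context_by_url[u]):
--             regex_context_by_url[u] = ctx
--     return dom_context_by_url, regex_context_by_url
-- ===== SOURCE B (Python) =====
-- def build_context_maps(candidates, regex_candidates):
--     def longest_per_url(pairs):
--         groups = {}
--         for u, ctx in pairs:
--             groups.setdefault(u, []).append(ctx)
--         return {u: max(cs, key=len) for u, cs in groups.items()}
--     return longest_per_url(candidates), longest_per_url(regex_candidates)
-- ===== Notes on version B (the rewrite author's own statement) =====
-- stated objective: alternative
-- what changed: B replaces A's incremental keep-the-longest dict updates with a group-then-reduce pass: it first collects all contexts per URL with setdefault/append, then builds each map by taking max(cs, key=len) (first maximal, matching A's strict '>' tie-break) per URL.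
import Mathlib
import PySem

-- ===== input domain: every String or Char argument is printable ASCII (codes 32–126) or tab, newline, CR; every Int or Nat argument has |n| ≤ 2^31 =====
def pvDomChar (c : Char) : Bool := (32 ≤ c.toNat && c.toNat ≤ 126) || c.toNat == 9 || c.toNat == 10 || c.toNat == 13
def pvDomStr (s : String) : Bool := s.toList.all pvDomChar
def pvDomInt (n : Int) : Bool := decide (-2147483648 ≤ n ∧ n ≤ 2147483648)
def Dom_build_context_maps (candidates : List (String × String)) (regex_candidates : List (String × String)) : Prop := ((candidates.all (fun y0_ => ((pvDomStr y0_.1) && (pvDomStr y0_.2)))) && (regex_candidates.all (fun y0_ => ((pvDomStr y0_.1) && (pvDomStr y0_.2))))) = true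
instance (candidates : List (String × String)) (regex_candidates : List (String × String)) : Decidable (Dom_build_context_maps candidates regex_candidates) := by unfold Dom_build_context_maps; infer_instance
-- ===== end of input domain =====

-- B keeps A's behaviour but uses a group-then-reduce decomposition instead of incremental updates.

-- ===== PORT A =====
def build_context_maps (candidates : List (String × String)) (regex_candidates : List (String × String)) : (List (String × String)) × (List (String × String)) :=
  let dom_context_by_url : PySem.Dict String String :=
    candidates.foldl (fun d p =>
      if !d.contains p.1 || decide (PySem.Str.len p.2 > PySem.Str.len (d.getD p.1 "")) then
        d.insert p.1 p.2
      else d) PySem.Dict.empty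
  let regex_context_by_url : PySem.Dict String String :=
    regex_candidates.foldl (fun d p =>
      if !d.contains p.1 || decide (PySem.Str.len p.2 > PySem.Str.len (d.getD p.1 "")) then
        d.insert p.1 p.2
      else d) PySem.Dict.empty
  (dom_context_by_url.items, regex_context_by_url.items)

-- ===== PORT B =====
-- groups = {}; for u, ctx in pairs: groups.setdefault(u, []).append(ctx)
def pvGroups (pairs : List (String × String)) : PySem.Dict String (List String) :=
  pairs.foldl (fun g p => g.modify p.1 [] (· ++ [p.2])) PySem.Dict.empty

-- {u: max(cs, key=len) for u, cs in groups.items()}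
def pvLongestPerUrl (pairs : List (String × String)) : List (String × String) :=
  ((pvGroups pairs).items.foldl
    (fun d p => d.insert p.1 ((PySem.List.max? p.2 PySem.Str.len).getD "")) PySem.Dict.empty).items

def build_context_maps_alt (candidates : List (String × String)) (regex_candidates : List (String × String)) : (List (String × String)) × (List (String × String)) :=
  (pvLongestPerUrl candidates, pvLongestPerUrl regex_candidates)

-- ===== PRECONDITION & SPEC =====
def Spec_build_context_maps (candidates : List (String × String)) (regex_candidates : List (String × String)) (out : (List (String × String)) × (List (String × String))) : Prop := out = build_context_maps_alt candidates regex_candidates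
instance (candidates : List (String × String)) (regex_candidates : List (String × String)) (out : (List (String × String)) × (List (String × String))) : Decidable (Spec_build_context_maps candidates regex_candidates out) := by unfold Spec_build_context_maps; infer_instance

-- ===== CLAIM (what is proved, stated in full; the proofs are below) =====
def Claim_equal_build_context_maps : Prop := ∀ (candidates : List (String × String)) (regex_candidates : List (String × String)), Dom_build_context_maps candidates regex_candidates → Spec_build_context_maps candidates regex_candidates (build_context_maps candidates regex_candidates)

-- ===== LEMMAS AND PROOFS =====

-- the value B stores for one group entry
def pvBest (p : String × List String) : String × String :=
  (p.1, (PySem.List.max? p.2 PySem.Str.len).getD "")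

-- invariant tying A's running dict to B's grouping dict
def pvInv (d : PySem.Dict String String) (g : PySem.Dict String (List String)) : Prop :=
  d.items = g.items.map pvBest ∧ g.keys.Nodup ∧ ∀ p ∈ g.items, p.2 ≠ []

lemma pvMax.append_one (cs : List String) (c m : String)
    (h : PySem.List.max? cs PySem.Str.len = some m) :
    PySem.List.max? (cs ++ [c]) PySem.Str.len
      = some (if PySem.Str.len m < PySem.Str.len c then c else m) := by
  simp only [PySem.List.max?] at h ⊢
  rw [List.foldl_append, h]
  simp only [List.foldl_cons, List.foldl_nil]
  split <;> rfl

lemma pvInv_step (d : PySem.Dict String String) (g : PySem.Dict String (List String))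
    (x : String × String) (h : pvInv d g) :
    pvInv (if !d.contains x.1 || decide (PySem.Str.len x.2 > PySem.Str.len (d.getD x.1 "")) then
             d.insert x.1 x.2 else d)
          (g.modify x.1 [] (· ++ [x.2])) := by
  obtain ⟨hitems, hnd, hne⟩ := h
  obtain ⟨u, c⟩ := x
  simp only [PySem.Dict.modify]
  have hkeys : d.keys = g.keys := by
    simp [PySem.Dict.keys, hitems, List.map_map, pvBest, Function.comp]
  have hcon : d.contains u = g.contains u := by
    rw [PySem.Dict.contains_eq_decide_mem_keys, PySem.Dict.contains_eq_decide_mem_keys, hkeys]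
  have hndd : d.keys.Nodup := by rw [hkeys]; exact hnd
  by_cases hc : g.contains u = true
  · -- key already present in both dicts
    obtain ⟨cs, hget⟩ : ∃ cs, g.get? u = some cs := by
      have := PySem.Dict.contains_eq_isSome_get? (d := g) (k := u)
      rw [hc] at this
      exact Option.isSome_iff_exists.mp this.symm
    have hmemg : (u, cs) ∈ g.items := PySem.Dict.mem_items_of_get?_eq_some g hget
    have hcs : cs ≠ [] := hne _ hmemg
    have hgetD : g.getD u [] = cs := PySem.Dict.getD_of_get?_eq_some g [] hget
    obtain ⟨m, hm⟩ : ∃ m, PySem.List.max? cs PySem.Str.len = some m := by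
      rcases Option.eq_none_or_eq_some (PySem.List.max? cs PySem.Str.len) with h0 | h0
      · exact absurd ((PySem.List.max?_eq_none_iff _ _).mp h0) hcs
      · exact h0
    have hmemd : (u, m) ∈ d.items := by
      rw [hitems]
      have : pvBest (u, cs) = (u, m) := by simp [pvBest, hm]
      exact this ▸ List.mem_map_of_mem hmemg
    have hdget : d.get? u = some m := PySem.Dict.get?_of_mem_items d hmemd hndd
    have hdgetD : d.getD u "" = m := PySem.Dict.getD_of_get?_eq_some d "" hdget
    have happ := pvMax.append_one cs c m hm
    have hiff : PySem.Str.len m < PySem.Str.len c ↔ m.length < c.length := by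
      simp [PySem.Str.len]
    have hvals : ∀ p ∈ g.items, p.1 = u → p.2 = cs := by
      intro p hp hpu
      have := PySem.Dict.get?_of_mem_items g hp hnd
      rw [hpu, hget] at this
      exact (Option.some_inj.mp this).symm
    rw [hcon, hc, hgetD, hdgetD]
    by_cases hlen : PySem.Str.len m < PySem.Str.len c
    · -- new context strictly longer: both dicts overwrite in place
      have hlen' : m.length < c.length := hiff.mp hlen
      have : (!true || decide (PySem.Str.len c > PySem.Str.len m)) = true := by
        have h2 := hlen'; simp; omega
      rw [this, if_pos rfl]
      refine ⟨?_, ?_, ?_⟩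
      · rw [PySem.Dict.items_insert_of_contains _ _ (hcon ▸ hc),
            PySem.Dict.items_insert_of_contains _ _ hc, hitems, List.map_map, List.map_map]
        refine List.map_congr_left ?_
        intro p hp
        by_cases hpu : p.1 = u
        · simp [pvBest, hpu, happ, hlen']
        · simp [pvBest, hpu]
      · exact PySem.Dict.nodup_keys_insert _ _ _ hnd
      · intro p hp
        rcases (PySem.Dict.mem_items_insert _ _ _ _).mp hp with h1 | h1
        · rw [h1]; simp
        · exact hne _ h1.1
    · -- not longer: both dicts keep the stored maximum
      have hlen' : ¬ m.length < c.length := fun hh => hlen (hiff.mpr hh)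
      have : (!true || decide (PySem.Str.len c > PySem.Str.len m)) = false := by
        have h2 := hlen'; simp; omega
      rw [this, if_neg (by simp)]
      refine ⟨?_, ?_, ?_⟩
      · rw [PySem.Dict.items_insert_of_contains _ _ hc, hitems, List.map_map]
        refine List.map_congr_left ?_
        intro p hp
        by_cases hpu : p.1 = u
        · have hp2 : p.2 = cs := hvals p hp hpu
          obtain ⟨p1, p2⟩ := p
          simp only at hpu hp2
          subst hpu hp2
          simp [pvBest, happ, hlen', hm]
        · simp [pvBest, hpu]
      · exact PySem.Dict.nodup_keys_insert _ _ _ hnd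
      · intro p hp
        rcases (PySem.Dict.mem_items_insert _ _ _ _).mp hp with h1 | h1
        · rw [h1]; simp
        · exact hne _ h1.1
  · -- fresh key: both dicts append at the end
    have hc' : g.contains u = false := by simpa using hc
    have hdc : d.contains u = false := by rw [hcon]; exact hc'
    have hgetD : g.getD u [] = [] := PySem.Dict.getD_of_not_contains g [] hc'
    rw [hgetD, hdc]
    simp only [Bool.not_false, Bool.true_or]
    rw [if_pos trivial]
    refine ⟨?_, ?_, ?_⟩
    · rw [PySem.Dict.items_insert_of_not_contains _ _ hdc,
          PySem.Dict.items_insert_of_not_contains _ _ hc', hitems, List.map_append]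
      simp [pvBest, PySem.List.max?]
    · exact PySem.Dict.nodup_keys_insert _ _ _ hnd
    · intro p hp
      rcases (PySem.Dict.mem_items_insert _ _ _ _).mp hp with h1 | h1
      · rw [h1]; simp
      · exact hne _ h1.1

lemma pvInv_fold (pairs : List (String × String)) (d : PySem.Dict String String)
    (g : PySem.Dict String (List String)) (h : pvInv d g) :
    pvInv (pairs.foldl (fun d p =>
            if !d.contains p.1 || decide (PySem.Str.len p.2 > PySem.Str.len (d.getD p.1 "")) then
              d.insert p.1 p.2 else d) d)
          (pairs.foldl (fun g p => g.modify p.1 [] (· ++ [p.2])) g) := by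
  induction pairs generalizing d g with
  | nil => exact h
  | cons x t ih => exact ih _ _ (pvInv_step d g x h)

lemma pvLongest_eq (pairs : List (String × String)) :
    pairs.foldl (fun d p =>
        if !d.contains p.1 || decide (PySem.Str.len p.2 > PySem.Str.len (d.getD p.1 "")) then
          d.insert p.1 p.2 else d) PySem.Dict.empty
      = PySem.Dict.mk (pvLongestPerUrl pairs) := by
  have hinv : pvInv (PySem.Dict.empty) (PySem.Dict.empty) := by
    refine ⟨rfl, ?_, ?_⟩ <;> simp [PySem.Dict.keys, PySem.Dict.empty]
  have h := pvInv_fold pairs PySem.Dict.empty PySem.Dict.empty hinv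
  have hgnd : (pvGroups pairs).keys.Nodup := by
    have := PySem.Dict.nodup_keys_foldl_modify_key pairs Prod.fst []
      (fun g p => (· ++ [p.2])) PySem.Dict.empty (by simp [PySem.Dict.keys, PySem.Dict.empty])
    exact this
  apply PySem.Dict.ext
  rw [h.1]
  show (pvGroups pairs).items.map pvBest = pvLongestPerUrl pairs
  unfold pvLongestPerUrl
  rw [PySem.Dict.items_foldl_insert_fresh (pvGroups pairs).items Prod.fst
        (fun p => (PySem.List.max? p.2 PySem.Str.len).getD "") PySem.Dict.empty
        (fun a _ => PySem.Dict.contains_empty _) hgnd]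
  simp [pvBest, PySem.Dict.empty]

-- ===== VERDICT (by name: the statement is the Claim_ definition above) =====
theorem build_context_maps_spec : Claim_equal_build_context_maps := by
  intro candidates regex_candidates _
  unfold Spec_build_context_maps build_context_maps build_context_maps_alt
  rw [pvLongest_eq candidates, pvLongest_eq regex_candidates]
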